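-- pv_equiv track=rewrite | github.com/loning/mbook-binary | src/binaryuniverse/tests/test_D1_14_consciousness_threshold.py | verify_no11_constraint
-- ===== SOURCE A (Python) =====
-- from typing import List, Tuple, Dict, Set, Optional, Callable
--
-- def verify_no11_constraint(indices: List[int]) -> bool:
--     """
--     Verify that indices satisfy the No-11 constraint.
--
--     Args:
--         indices: List of Fibonacci indices
--
--     Returns:
--         True if no consecutive indices exist
--     """
--     if len(indices) <= 1:
--         return True
--
--     sorted_indices = sorted(indices)
--     for i in range(len(sorted_indices) - 1):
--         if sorted_indices[i+1] - sorted_indices[i] == 1: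
--             return False
--     return True
-- ===== SOURCE B (Python) =====
-- def verify_no11_constraint(indices):
--     """Verify that no two indices are consecutive integers (No-11 constraint)."""
--     s = set(indices)
--     return s.isdisjoint(x + 1 for x in s)
-- ===== Notes on version B (the rewrite author's own statement) =====
-- stated objective: idiomatic
-- what changed: Replaces A's sort-then-adjacent-scan with set arithmetic: build the index set once and return the disjointness of the set and its +1 shift; no sorting, no length guard, no indexed loop.
import Mathlib
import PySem

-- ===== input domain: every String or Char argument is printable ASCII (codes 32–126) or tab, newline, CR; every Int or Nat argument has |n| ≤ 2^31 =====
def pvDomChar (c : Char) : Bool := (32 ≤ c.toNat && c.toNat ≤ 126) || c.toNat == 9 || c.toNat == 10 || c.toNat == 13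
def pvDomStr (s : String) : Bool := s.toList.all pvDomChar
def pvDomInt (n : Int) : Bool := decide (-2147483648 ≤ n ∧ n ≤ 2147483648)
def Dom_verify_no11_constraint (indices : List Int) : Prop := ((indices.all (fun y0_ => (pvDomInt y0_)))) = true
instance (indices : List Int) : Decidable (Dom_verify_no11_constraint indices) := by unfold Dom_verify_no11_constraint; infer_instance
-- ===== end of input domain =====

-- B replaces A's sort-then-adjacent-scan with set arithmetic: the index set is disjoint from its +1 shift (idiomatic; no sort, no length guard).

-- ===== PORT A =====
-- 'for i in range(len(s)-1): if s[i+1]-s[i]==1: return False' — the adjacent-pair scan with early return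
def pvScanA : List Int → Bool
  | a :: b :: t => if b - a = 1 then false else pvScanA (b :: t)
  | _ => true

def verify_no11_constraint (indices : List Int) : Bool :=
  if indices.length ≤ 1 then true
  else pvScanA (PySem.List.sorted indices (fun x => x) false)

-- ===== PORT B =====
def verify_no11_constraint_alt (indices : List Int) : Bool :=
  let s : PySem.Set Int := PySem.Set.ofList indices
  PySem.Set.isdisjoint s (s.map (· + 1))

-- ===== PRECONDITION & SPEC =====
def Spec_verify_no11_constraint (indices : List Int) (out : Bool) : Prop := out = verify_no11_constraint_alt indices
instance (indices : List Int) (out : Bool) : Decidable (Spec_verify_no11_constraint indices out) := by unfold Spec_verify_no11_constraint; infer_instance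

-- ===== CLAIM (what is proved, stated in full; the proofs are below) =====
def Claim_equal_verify_no11_constraint : Prop := ∀ (indices : List Int), Dom_verify_no11_constraint indices → Spec_verify_no11_constraint indices (verify_no11_constraint indices)

-- ===== LEMMAS AND PROOFS =====

-- On a ≤-sorted list the adjacent-pair scan detects exactly the pairs at distance 1.
lemma pvScanA_iff : ∀ (s : List Int), s.Pairwise (· ≤ ·) →
    (pvScanA s = true ↔ ∀ x ∈ s, ∀ y ∈ s, y - x ≠ 1)
  | [], _ => by simp [pvScanA]
  | [a], _ => by simp [pvScanA]
  | a :: b :: t, h => by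
    have hab : a ≤ b := (List.pairwise_cons.mp h).1 b (by simp)
    have hbt : ∀ x ∈ t, b ≤ x := (List.pairwise_cons.mp (List.pairwise_cons.mp h).2).1
    have ih := pvScanA_iff (b :: t) (List.pairwise_cons.mp h).2
    by_cases hd : b - a = 1
    · simp only [pvScanA, if_pos hd]
      constructor
      · intro hf; exact absurd hf (by simp)
      · intro hall
        exact absurd (hall a (by simp) b (by simp)) (by omega)
    · simp only [pvScanA, if_neg hd]
      rw [ih]
      constructor
      · intro hall x hx y hy hxy
        rcases List.mem_cons.mp hx with rfl | hx'
        · rcases List.mem_cons.mp hy with rfl | hy'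
          · omega
          · -- x = a, y ∈ b :: t: a ≤ b ≤ y and b - a ≠ 1 force a contradiction via the pair (b, y)
            have hby : b ≤ y := by
              rcases List.mem_cons.mp hy' with rfl | hy''
              · exact le_refl y
              · exact hbt y hy''
            have hbx : b = x := by omega
            exact hall b (by simp) y hy' (by omega)
        · rcases List.mem_cons.mp hy with rfl | hy'
          · have hbx : b ≤ x := by
              rcases List.mem_cons.mp hx' with rfl | hx''
              · exact le_refl x
              · exact hbt x hx''
            omega
          · exact hall x hx' y hy' hxy
      · intro hall x hx y hy
        exact hall x (List.mem_cons_of_mem a hx) y (List.mem_cons_of_mem a hy)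

-- Characterisation of A's result over the input list.
lemma pvA_iff (indices : List Int) :
    verify_no11_constraint indices = true ↔ ∀ x ∈ indices, ∀ y ∈ indices, y - x ≠ 1 := by
  unfold verify_no11_constraint
  by_cases h : indices.length ≤ 1
  · simp only [if_pos h, true_iff]
    match indices, h with
    | [], _ => simp
    | [a], _ => simp
  · simp only [if_neg h]
    rw [pvScanA_iff _ (PySem.List.sorted_pairwise indices (fun x => x) )]
    constructor
    · intro hall x hx y hy
      exact hall x ((PySem.List.mem_sorted _ _ _ _).mpr hx) y ((PySem.List.mem_sorted _ _ _ _).mpr hy)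
    · intro hall x hx y hy
      exact hall x ((PySem.List.mem_sorted _ _ _ _).mp hx) y ((PySem.List.mem_sorted _ _ _ _).mp hy)

-- Characterisation of B's result over the input list.
lemma pvB_iff (indices : List Int) :
    verify_no11_constraint_alt indices = true ↔ ∀ x ∈ indices, ∀ y ∈ indices, y - x ≠ 1 := by
  simp only [verify_no11_constraint_alt, PySem.Set.isdisjoint, PySem.Set.contains]
  simp [PySem.Set.mem_ofList]
  constructor
  · intro hall x hx y hy hxy
    exact hall y hy x hx (by omega)
  · intro hall x hx y hy hxy
    exact hall y hy x hx (by omega)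

-- ===== VERDICT (by name: the statement is the Claim_ definition above) =====
theorem verify_no11_constraint_spec : Claim_equal_verify_no11_constraint := by
  intro indices _
  unfold Spec_verify_no11_constraint
  rw [Bool.eq_iff_iff, pvA_iff, pvB_iff]
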